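-- pv_equiv track=rewrite | github.com/MarcoHassan/Python-TAU-Electrical-Engineering | Homework 6.py | find_max_modulo
-- ===== SOURCE A (Python) =====
-- def find_max_modulo(numbers,m):
--
--     if len(numbers) == 1:
--         if numbers[0]%m==0:
--             return numbers[0]
--         else:
--             return -1
--
--     if len(numbers) == 0:
--         return -1
--
--     if numbers[0]%m==0:
--         if numbers[0] > find_max_modulo(numbers[1:], m):
--             return numbers[0]
--         else:
--             return find_max_modulo(numbers[1:], m)
--
--     else:
--         return find_max_modulo(numbers[1:], m)
-- ===== SOURCE B (Python) =====
-- def find_max_modulo(numbers, m):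
--     best = None
--     for x in numbers:
--         if x % m == 0:
--             if best is None or x > best:
--                 best = x
--     return -1 if best is None else best
-- ===== Notes on version B (the rewrite author's own statement) =====
-- stated objective: simpler
-- what changed: Replaces the tail-slice recursion (which re-slices the list and can call itself twice per divisible head) with a single iterative pass keeping the best divisible element in a None-seeded accumulator.
-- intended difference: When the list contains divisible elements but they are all < -1 and the last element is not divisible, A's -1 sentinel leaks out of the recursion and it returns -1, while B returns the true maximum divisible element, which is the intended answer. — e.g. on find_max_modulo([-4, 1], 2): A returns -1, B returns -4
import Mathlib
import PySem

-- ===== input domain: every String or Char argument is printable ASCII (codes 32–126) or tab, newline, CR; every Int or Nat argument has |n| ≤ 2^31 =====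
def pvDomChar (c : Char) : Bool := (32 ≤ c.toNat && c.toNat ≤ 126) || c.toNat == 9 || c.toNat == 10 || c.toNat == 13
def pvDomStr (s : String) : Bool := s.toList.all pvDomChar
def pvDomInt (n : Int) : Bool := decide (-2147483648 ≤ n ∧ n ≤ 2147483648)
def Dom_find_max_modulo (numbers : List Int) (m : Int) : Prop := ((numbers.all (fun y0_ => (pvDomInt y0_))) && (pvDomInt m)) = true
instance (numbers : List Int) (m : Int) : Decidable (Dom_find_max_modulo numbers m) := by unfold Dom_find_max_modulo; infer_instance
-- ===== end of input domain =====

-- B replaces A's tail-slice recursion by one iterative pass with a None-seeded best accumulator;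
-- on lists whose divisible elements are all < -1 (and whose last element is not divisible) B returns
-- the true maximum divisible element where A's -1 sentinel leaks out (stated as D_ below).

-- ===== PORT A =====
-- literal transliteration of A; numbers[1:] is PySem.List.slice numbers 1 none, numbers[0] via pyGet?
def find_max_modulo (numbers : List Int) (m : Int) : Int :=
  if h1 : numbers.length = 1 then
    if PySem.Int.mod ((PySem.List.pyGet? numbers 0).getD 0) m = 0 then
      (PySem.List.pyGet? numbers 0).getD 0
    else -1
  else if h0 : numbers.length = 0 then -1
  else if PySem.Int.mod ((PySem.List.pyGet? numbers 0).getD 0) m = 0 then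
    if (PySem.List.pyGet? numbers 0).getD 0 >
        find_max_modulo (PySem.List.slice numbers (some 1) none) m then
      (PySem.List.pyGet? numbers 0).getD 0
    else
      find_max_modulo (PySem.List.slice numbers (some 1) none) m
  else
    find_max_modulo (PySem.List.slice numbers (some 1) none) m
termination_by numbers.length
decreasing_by all_goals simp [PySem.List.slice_from_one]; omega

-- ===== PORT B =====
-- literal transliteration of B: best = None; for x in numbers: …; return -1 if best is None else best
def find_max_modulo_alt (numbers : List Int) (m : Int) : Int :=
  let best : Option Int := numbers.foldl
    (fun best x =>
      if PySem.Int.mod x m = 0 then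
        match best with
        | none => some x
        | some b => if x > b then some x else best
      else best) none
  match best with
  | none => -1
  | some b => b

-- ===== PRECONDITION & SPEC =====
-- Pre_ excludes exactly the inputs on which A raises ZeroDivisionError: m = 0 with a nonempty list
-- (with an empty list A returns before dividing, so the empty list stays inside for every m).
def Pre_find_max_modulo (numbers : List Int) (m : Int) : Prop := m ≠ 0 ∨ numbers = []
instance (numbers : List Int) (m : Int) : Decidable (Pre_find_max_modulo numbers m) := by
  unfold Pre_find_max_modulo; infer_instance
def pvWitness_find_max_modulo : List Int × Int := ([6, -4, 7], 2)

-- When the list has divisible elements but they are all < -1 and the last element is not divisible,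
-- A returns -1 (its sentinel leaks out of the recursion) while B returns the true maximum divisible
-- element, which is the intended answer.
def D_find_max_modulo (numbers : List Int) (m : Int) : Prop :=
  numbers ≠ [] ∧ PySem.Int.mod (numbers.getLastD 0) m ≠ 0 ∧
  (∃ x ∈ numbers, PySem.Int.mod x m = 0) ∧
  (∀ x ∈ numbers, PySem.Int.mod x m = 0 → x < -1)
instance (numbers : List Int) (m : Int) : Decidable (D_find_max_modulo numbers m) := by
  unfold D_find_max_modulo; infer_instance

def Spec_find_max_modulo (numbers : List Int) (m : Int) (out : Int) : Prop :=
  ¬ D_find_max_modulo numbers m → out = find_max_modulo_alt numbers m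
instance (numbers : List Int) (m : Int) (out : Int) : Decidable (Spec_find_max_modulo numbers m out) := by
  unfold Spec_find_max_modulo; infer_instance

def pvDiffWitness_find_max_modulo : List Int × Int := ([-4, 1], 2)
def pvDiffWitnessOut_find_max_modulo : Int × Int := (-1, -4)

-- ===== CLAIM (what is proved, stated in full; the proofs are below) =====
def Claim_unchanged_find_max_modulo : Prop := ∀ (numbers : List Int) (m : Int), Dom_find_max_modulo numbers m → Pre_find_max_modulo numbers m → Spec_find_max_modulo numbers m (find_max_modulo numbers m)
def Claim_changed_find_max_modulo : Prop := Dom_find_max_modulo (pvDiffWitness_find_max_modulo.1) (pvDiffWitness_find_max_modulo.2) ∧ Pre_find_max_modulo (pvDiffWitness_find_max_modulo.1) (pvDiffWitness_find_max_modulo.2) ∧ D_find_max_modulo (pvDiffWitness_find_max_modulo.1) (pvDiffWitness_find_max_modulo.2) ∧ find_max_modulo (pvDiffWitness_find_max_modulo.1) (pvDiffWitness_find_max_modulo.2) = pvDiffWitnessOut_find_max_modulo.1 ∧ find_max_modulo_alt (pvDiffWitness_find_max_modulo.1) (pvDiffWitness_find_max_modulo.2) = pvDiffWitnessOut_find_max_modulo.2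 ∧ pvDiffWitnessOut_find_max_modulo.1 ≠ pvDiffWitnessOut_find_max_modulo.2
def Claim_exact_find_max_modulo : Prop := ∀ (numbers : List Int) (m : Int), Dom_find_max_modulo numbers m → Pre_find_max_modulo numbers m → D_find_max_modulo numbers m → find_max_modulo numbers m ≠ find_max_modulo_alt numbers m

-- ===== LEMMAS AND PROOFS =====

-- the divisible elements of the list
def pvDivs (numbers : List Int) (m : Int) : List Int :=
  numbers.filter (fun x => PySem.Int.mod x m = 0)

-- option-valued running maximum
def pvOMax (b : Option Int) (l : List Int) : Option Int :=
  l.foldl (fun b x => some (match b with | none => x | some v => max v x)) b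

-- the step function of pvOMax
def pvM (b : Option Int) (x : Int) : Int := match b with | none => x | some v => max v x

lemma pv_omax_some (l : List Int) : ∀ a : Int,
    pvOMax (some a) l = some ((pvOMax none l).elim a (max a)) := by
  induction l with
  | nil => intro a; rfl
  | cons x l ih =>
    intro a
    show pvOMax (some (max a x)) l = some ((pvOMax (some x) l).elim a (max a))
    rw [ih, ih x]
    cases h : pvOMax none l with
    | none => simp
    | some v => simp [Option.elim, max_assoc]

lemma pv_omax_ne_none (l : List Int) (h : l ≠ []) : pvOMax none l ≠ none := by
  cases l with
  | nil => exact absurd rfl h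
  | cons x l =>
    show pvOMax (some x) l ≠ none
    rw [pv_omax_some]; simp

lemma pv_omax_mem (l : List Int) : ∀ v : Int, pvOMax none l = some v → v ∈ l := by
  induction l with
  | nil => intro v h; exact absurd h (by simp [pvOMax])
  | cons x l ih =>
    intro v h
    rw [show pvOMax none (x :: l) = pvOMax (some x) l from rfl, pv_omax_some] at h
    cases hl : pvOMax none l with
    | none => rw [hl] at h; simp [Option.elim] at h; simp [h]
    | some w =>
      rw [hl] at h; simp [Option.elim] at h
      rcases max_choice x w with hc | hc <;> rw [hc] at h
      · simp [h]
      · exact List.mem_cons_of_mem _ (h ▸ ih w hl)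

lemma pv_omax_ge (l : List Int) : ∀ (v x : Int), pvOMax none l = some v → x ∈ l → x ≤ v := by
  induction l with
  | nil => intro v x h hx; simp at hx
  | cons y l ih =>
    intro v x h hx
    rw [show pvOMax none (y :: l) = pvOMax (some y) l from rfl, pv_omax_some] at h
    cases hl : pvOMax none l with
    | none =>
      rw [hl] at h; simp [Option.elim] at h
      cases l with
      | nil => simp at hx; omega
      | cons z l => exact absurd hl (pv_omax_ne_none _ (by simp))
    | some w =>
      rw [hl] at h; simp [Option.elim] at h
      rcases List.mem_cons.mp hx with hx | hx
      · omega
      · have := ih w x hl hx; omega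

lemma pv_getLastD_mem (l : List Int) (d : Int) (h : l ≠ []) : l.getLastD d ∈ l := by
  induction l generalizing d with
  | nil => exact absurd rfl h
  | cons x l ih =>
    cases l with
    | nil => simp
    | cons y l => exact List.mem_cons_of_mem _ (ih d (by simp))

-- characterization targets
def pvBChar (numbers : List Int) (m : Int) : Int :=
  match pvOMax none (pvDivs numbers m) with
  | none => -1
  | some v => v

def pvAChar (numbers : List Int) (m : Int) : Int :=
  match pvOMax none (pvDivs numbers m) with
  | none => -1
  | some v => if PySem.Int.mod (numbers.getLastD 0) m = 0 then v else max v (-1)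

lemma pvB_loop (m : Int) (ns : List Int) : ∀ b : Option Int,
    ns.foldl (fun best x =>
      if PySem.Int.mod x m = 0 then
        match best with
        | none => some x
        | some b => if x > b then some x else best
      else best) b = pvOMax b (pvDivs ns m) := by
  induction ns with
  | nil => intro b; rfl
  | cons x ns ih =>
    intro b
    by_cases hx : PySem.Int.mod x m = 0
    · have hstep : (if PySem.Int.mod x m = 0 then
          match b with
          | none => some x
          | some b' => if x > b' then some x else b
          else b) = some (pvM b x) := by
        cases b with
        | none => simp [hx, pvM]
        | some v => simp only [hx, if_pos, pvM]; split_ifs with h <;> congr 1 <;> omega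
      simp only [List.foldl_cons, hstep]
      rw [ih]
      simp [pvDivs, hx, pvOMax, pvM]
    · simp only [List.foldl_cons, if_neg hx]
      rw [ih]
      simp [pvDivs, hx]

lemma pvB_char (ns : List Int) (m : Int) : find_max_modulo_alt ns m = pvBChar ns m := by
  unfold find_max_modulo_alt pvBChar
  rw [pvB_loop m ns none]

lemma pvA_cons (x : Int) (xs : List Int) (m : Int) (hxs : xs ≠ []) :
    find_max_modulo (x :: xs) m =
      if PySem.Int.mod x m = 0 then max x (find_max_modulo xs m) else find_max_modulo xs m := by
  rw [find_max_modulo]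
  have h1 : ¬ (x :: xs).length = 1 := by
    cases xs with
    | nil => exact absurd rfl hxs
    | cons y l => simp
  have h0 : ¬ (x :: xs).length = 0 := by simp
  simp only [dif_neg h1, dif_neg h0, PySem.List.slice_from_one, List.tail_cons]
  have hg : (PySem.List.pyGet? (x :: xs) 0).getD 0 = x := by
    simp [PySem.List.pyGet?, PySem.List.pyIdx?]
  rw [hg]
  split_ifs with h h2 <;> omega

lemma pvA_char (ns : List Int) (m : Int) : find_max_modulo ns m = pvAChar ns m := by
  induction ns with
  | nil => simp [find_max_modulo, pvAChar, pvDivs, pvOMax]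
  | cons x xs ih =>
    cases xs with
    | nil =>
      rw [find_max_modulo]
      simp only [List.length_cons, List.length_nil]
      have hg : (PySem.List.pyGet? [x] 0).getD 0 = x := by
        simp [PySem.List.pyGet?, PySem.List.pyIdx?]
      rw [hg]
      unfold pvAChar pvDivs
      by_cases hx : PySem.Int.mod x m = 0 <;>
        simp [hx, pvOMax, List.getLastD]
    | cons y l =>
      have hne : (y :: l : List Int) ≠ [] := by simp
      rw [pvA_cons x (y :: l) m hne, ih]
      have hlast : (x :: y :: l).getLastD 0 = (y :: l).getLastD 0 := by
        simp [List.getLastD_eq_getLast?]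
      unfold pvAChar pvDivs
      by_cases hx : PySem.Int.mod x m = 0
      · have hfc : List.filter (fun x => decide (PySem.Int.mod x m = 0)) (x :: y :: l)
            = x :: List.filter (fun x => decide (PySem.Int.mod x m = 0)) (y :: l) := by
          simp [List.filter_cons, hx]
        rw [hfc, hlast,
            show pvOMax none (x :: List.filter (fun x => decide (PySem.Int.mod x m = 0)) (y :: l))
              = pvOMax (some x) (List.filter (fun x => decide (PySem.Int.mod x m = 0)) (y :: l)) from rfl,
            pv_omax_some]
        cases hd : pvOMax none (List.filter (fun x => decide (PySem.Int.mod x m = 0)) (y :: l)) with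
        | none =>
          -- tail has no divisible element, so its last is not divisible
          have hlnd : ¬ PySem.Int.mod ((y :: l).getLastD 0) m = 0 := by
            intro hdv
            have hmem : (y :: l).getLastD 0 ∈ List.filter (fun x => decide (PySem.Int.mod x m = 0)) (y :: l) :=
              List.mem_filter.mpr ⟨pv_getLastD_mem (y :: l) 0 hne,
                by simp only [decide_eq_true_eq]; exact hdv⟩
            cases hf : List.filter (fun x => decide (PySem.Int.mod x m = 0)) (y :: l) with
            | nil => rw [hf] at hmem; simp at hmem
            | cons a b => exact absurd hd (pv_omax_ne_none _ (by rw [hf]; simp))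
          simp only [Option.elim, if_pos hx, if_neg hlnd]
        | some v =>
          simp only [Option.elim, if_pos hx]
          split_ifs with hl <;> omega
      · have hfc : List.filter (fun x => decide (PySem.Int.mod x m = 0)) (x :: y :: l)
            = List.filter (fun x => decide (PySem.Int.mod x m = 0)) (y :: l) := by
          simp [List.filter_cons, hx]
        rw [hfc, hlast, if_neg hx]

theorem find_max_modulo_spec : Claim_unchanged_find_max_modulo := by
  intro ns m _ hpre hD
  rw [pvA_char, pvB_char]
  unfold pvAChar pvBChar
  cases hd : pvOMax none (pvDivs ns m) with
  | none => rfl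
  | some v =>
    simp only []
    split_ifs with hl
    · rfl
    · -- last not divisible; since ¬D there is a divisible element ≥ -1, and v is the max
      have hvmem := pv_omax_mem _ v hd
      have hvns : v ∈ ns := (List.mem_filter.mp hvmem).1
      have hne : ns ≠ [] := by intro h; rw [h] at hvns; simp at hvns
      have hvdiv : PySem.Int.mod v m = 0 := by
        simpa using (List.mem_filter.mp hvmem).2
      unfold D_find_max_modulo at hD
      push Not at hD
      obtain ⟨x, hxmem, hxdiv, hxge⟩ := hD hne hl ⟨v, hvns, hvdiv⟩
      have hxf : x ∈ pvDivs ns m := List.mem_filter.mpr ⟨hxmem, by simp [hxdiv]⟩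
      have := pv_omax_ge _ v x hd hxf
      omega

theorem find_max_modulo_changed : Claim_changed_find_max_modulo := by
  unfold Claim_changed_find_max_modulo
  refine ⟨by decide, by decide, by decide, ?_, by decide, by decide⟩
  rw [pvA_char]; decide

theorem find_max_modulo_tight : Claim_exact_find_max_modulo := by
  intro ns m _ hpre hD
  obtain ⟨hne, hlast, ⟨x, hxmem, hxdiv⟩, hall⟩ := hD
  rw [pvA_char, pvB_char]
  unfold pvAChar pvBChar
  cases hd : pvOMax none (pvDivs ns m) with
  | none =>
    exact absurd hd (pv_omax_ne_none _ (by
      intro hf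
      have : x ∈ pvDivs ns m := List.mem_filter.mpr ⟨hxmem, by simp [hxdiv]⟩
      rw [hf] at this; simp at this))
  | some v =>
    have hvmem := pv_omax_mem _ v hd
    have hvfil := List.mem_filter.mp hvmem
    have hvlt : v < -1 := hall v hvfil.1 (by simpa using hvfil.2)
    simp only [if_neg hlast]
    omega
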